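-- pv_equiv track=rewrite | github.com/shubhangi318/news-analyzer | backend/sentiment_analysis/keyword_embeddings.py | _create_keyword_to_articles_mapping
-- ===== SOURCE A (Python) =====
-- from typing import List, Dict, Set, Tuple, Optional, Union
--
-- def _create_keyword_to_articles_mapping(article_keywords: List[List[str]]) -> Dict[str, Set[int]]:
--     """
--     Create a mapping from keywords to the articles they appear in.
--
--     Args:
--         article_keywords: List of keyword lists, one per article
--
--     Returns:
--         Dictionary mapping keywords to sets of article indices
--     """
--     keyword_to_articles = {}
--     for i, keywords in enumerate(article_keywords):
--         for kw in keywords: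
--             if kw not in keyword_to_articles:
--                 keyword_to_articles[kw] = set()
--             keyword_to_articles[kw].add(i)
--
--     return keyword_to_articles
-- ===== SOURCE B (Python) =====
-- from typing import List, Dict, Set
--
-- def _create_keyword_to_articles_mapping(article_keywords: List[List[str]]) -> Dict[str, Set[int]]:
--     # Distinct keywords in first-occurrence order.
--     distinct = dict.fromkeys(kw for kws in article_keywords for kw in kws)
--     # For each keyword, rescan the articles and collect the indices containing it.
--     return {kw: {i for i, kws in enumerate(article_keywords) if kw in kws}
--             for kw in distinct}
-- ===== Notes on version B (the rewrite author's own statement) =====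
-- stated objective: alternative
-- what changed: Inverts the traversal: instead of A's single streaming pass that threads a growing dict of sets through a nested article/keyword loop, B first computes the distinct keywords (dict.fromkeys of the flattened keyword stream) and then, for each distinct keyword, rescans the article list to collect the set of indices containing it.
import Mathlib
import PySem

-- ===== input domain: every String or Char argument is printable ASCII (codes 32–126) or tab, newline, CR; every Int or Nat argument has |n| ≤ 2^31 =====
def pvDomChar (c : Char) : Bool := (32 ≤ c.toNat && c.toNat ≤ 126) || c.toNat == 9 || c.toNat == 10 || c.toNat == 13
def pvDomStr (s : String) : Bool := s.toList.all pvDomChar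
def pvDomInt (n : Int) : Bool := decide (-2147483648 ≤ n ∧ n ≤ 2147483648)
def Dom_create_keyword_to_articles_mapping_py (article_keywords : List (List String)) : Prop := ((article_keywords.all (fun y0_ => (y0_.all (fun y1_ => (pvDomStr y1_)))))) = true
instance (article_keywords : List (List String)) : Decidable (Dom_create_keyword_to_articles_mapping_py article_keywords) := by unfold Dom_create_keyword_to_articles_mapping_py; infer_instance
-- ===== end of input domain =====

-- B inverts the traversal: instead of threading one growing dict of sets through A's nested
-- article/keyword loop, it first lists the distinct keywords and then, per keyword, rescans
-- the articles to collect that keyword's index set (alternative decomposition, not faster).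

-- ===== PORT A =====
-- A: one dict threaded through 'for i, keywords in enumerate(...): for kw in keywords: ...'
def create_keyword_to_articles_mapping_py (article_keywords : List (List String)) : List (String × List Int) :=
  ((PySem.List.enumerate article_keywords 0).foldl
    (fun d p =>
      p.2.foldl (fun d kw =>
        let d' := if d.contains kw then d else d.insert kw PySem.Set.empty
        d'.modify kw PySem.Set.empty (fun s => PySem.Set.add s p.1)) d)
    PySem.Dict.empty).items

-- ===== PORT B =====
-- B: distinct = dict.fromkeys(kw for kws in ... for kw in kws)  — ported as PySem.List.dedup,
--    which is exactly dict.fromkeys' key list (first occurrences, in order);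
--    then the dict comprehension {kw: {i for i, kws in enumerate(...) if kw in kws} for kw in distinct}.
def create_keyword_to_articles_mapping_py_alt (article_keywords : List (List String)) : List (String × List Int) :=
  let distinct := PySem.List.dedup (article_keywords.flatMap (fun kws => kws))
  distinct.map (fun kw =>
    (kw, (PySem.List.enumerate article_keywords 0).foldl
          (fun s p => if p.2.contains kw then PySem.Set.add s p.1 else s) PySem.Set.empty))

-- ===== PRECONDITION & SPEC =====
def Spec_create_keyword_to_articles_mapping_py (article_keywords : List (List String)) (out : List (String × List Int)) : Prop := out = create_keyword_to_articles_mapping_py_alt article_keywords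
instance (article_keywords : List (List String)) (out : List (String × List Int)) : Decidable (Spec_create_keyword_to_articles_mapping_py article_keywords out) := by unfold Spec_create_keyword_to_articles_mapping_py; infer_instance

-- ===== CLAIM (what is proved, stated in full; the proofs are below) =====
def Claim_equal_create_keyword_to_articles_mapping_py : Prop := ∀ (article_keywords : List (List String)), Dom_create_keyword_to_articles_mapping_py article_keywords → Spec_create_keyword_to_articles_mapping_py article_keywords (create_keyword_to_articles_mapping_py article_keywords)

-- ===== LEMMAS AND PROOFS =====

-- B's per-keyword index set, as a named abbreviation for the proofs.
def pvBset (kw : String) (L : List (Int × List String)) : List Int :=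
  L.foldl (fun s p => if p.2.contains kw then PySem.Set.add s p.1 else s) PySem.Set.empty

lemma pv_get?_mapAssoc (M : List String) (s : String → List Int) (k : String) :
    (PySem.Dict.mk (M.map (fun kw => (kw, s kw)))).get? k
      = if k ∈ M then some (s k) else none := by
  induction M with
  | nil => simp [PySem.Dict.get?]
  | cons m t ih =>
      by_cases h : m = k
      · subst h; simp [PySem.Dict.get?]
      · simp only [List.map_cons, PySem.Dict.get?_mk_cons, beq_iff_eq, if_neg h]
        rw [ih]
        simp [List.mem_cons, (Ne.symm h)]

lemma pv_contains_mapAssoc (M : List String) (s : String → List Int) (k : String) :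
    (PySem.Dict.mk (M.map (fun kw => (kw, s kw)))).contains k = decide (k ∈ M) := by
  rw [PySem.Dict.contains_eq_isSome_get?, pv_get?_mapAssoc]
  by_cases h : k ∈ M <;> simp [h]

lemma pv_inner (i : Int) (a : List String) : ∀ (M : List String) (s : String → List Int),
    (∀ kw, kw ∉ M → s kw = []) →
    a.foldl (fun d kw =>
        let d' := if d.contains kw then d else d.insert kw PySem.Set.empty
        d'.modify kw PySem.Set.empty (fun s => PySem.Set.add s i))
      (PySem.Dict.mk (M.map (fun kw => (kw, s kw))))
      = PySem.Dict.mk ((a.foldl PySem.Set.add M).map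
          (fun kw => (kw, if kw ∈ a then PySem.Set.add (s kw) i else s kw))) := by
  induction a with
  | nil => intro M s _; simp
  | cons k rest ih =>
      intro M s hE
      rw [List.foldl_cons, List.foldl_cons]
      have hstep :
          (let d' := if (PySem.Dict.mk (M.map (fun kw => (kw, s kw)))).contains k then
                        PySem.Dict.mk (M.map (fun kw => (kw, s kw)))
                     else (PySem.Dict.mk (M.map (fun kw => (kw, s kw)))).insert k PySem.Set.empty
           d'.modify k PySem.Set.empty (fun s => PySem.Set.add s i))
          = PySem.Dict.mk ((PySem.Set.add M k).map
              (fun kw => (kw, if kw = k then PySem.Set.add (s kw) i else s kw))) := by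
        by_cases hk : k ∈ M
        · -- key already present
          rw [show (PySem.Set.add M k) = M from PySem.Set.add_of_mem hk]
          simp only [pv_contains_mapAssoc, hk, decide_true, if_true, PySem.Dict.modify,
            PySem.Dict.getD_eq_get?_getD, pv_get?_mapAssoc, Option.getD_some,
            PySem.Dict.insert]
          congr 1
          rw [List.map_map]
          apply List.map_congr_left
          intro kw _
          by_cases h : kw = k
          · subst h; simp
          · simp [h]
        · -- fresh key
          have hsk : s k = [] := hE k hk
          rw [show (PySem.Set.add M k) = M ++ [k] from PySem.Set.add_of_not_mem hk]
          have hins : (PySem.Dict.mk (M.map (fun kw => (kw, s kw)))).insert k PySem.Set.empty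
              = PySem.Dict.mk ((M ++ [k]).map (fun kw => (kw, if kw = k then ([] : List Int) else s kw))) := by
            rw [PySem.Dict.insert, if_neg (by rw [pv_contains_mapAssoc]; simp [hk])]
            congr 1
            rw [List.map_append]
            simp only [List.map_cons, List.map_nil]
            congr 1
            apply List.map_congr_left
            intro kw hkw
            have : kw ≠ k := fun he => hk (he ▸ hkw)
            simp [this]
          simp only [pv_contains_mapAssoc, hk, decide_false, Bool.false_eq_true, if_false]
          rw [hins, PySem.Dict.modify, PySem.Dict.getD_eq_get?_getD, pv_get?_mapAssoc]
          rw [if_pos (by simp)]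
          simp only [Option.getD_some]
          rw [PySem.Dict.insert]
          rw [if_pos (by rw [pv_contains_mapAssoc]; simp)]
          congr 1
          rw [List.map_map]
          apply List.map_congr_left
          intro kw _
          by_cases h : kw = k
          · subst h; simp [hsk, PySem.Set.add]
          · simp [h]
      rw [hstep]
      have hE' : ∀ kw, kw ∉ PySem.Set.add M k → (fun kw => if kw = k then PySem.Set.add (s kw) i else s kw) kw = [] := by
        intro kw hkw
        have h1 : kw ∉ M ∧ kw ≠ k := by
          constructor
          · exact fun h => hkw (by rw [PySem.Set.mem_add]; exact Or.inl h)
          · exact fun h => hkw (by rw [PySem.Set.mem_add]; exact Or.inr h)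
        simp [h1.2, hE kw h1.1]
      rw [ih (PySem.Set.add M k) _ hE']
      congr 1
      apply List.map_congr_left
      intro kw _
      by_cases h : kw = k
      · subst h
        by_cases hr : kw ∈ rest
        · simp only [hr, if_true, List.mem_cons, true_or]
          rw [PySem.Set.add_of_mem (by rw [PySem.Set.mem_add]; exact Or.inr rfl)]
        · simp [hr]
      · have : (kw ∈ k :: rest) ↔ kw ∈ rest := by simp [List.mem_cons, h]
        simp [h, this]

lemma pv_bset_nil (kw : String) (xs : List (List String))
    (h : kw ∉ xs.flatMap (fun kws => kws)) :
    pvBset kw (PySem.List.enumerate xs 0) = [] := by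
  unfold pvBset
  rw [PySem.List.foldl_congr_mem (g := fun acc _ => acc), PySem.List.foldl_ignore]
  · rfl
  · intro acc p hp
    rcases (PySem.List.mem_enumerate_iff _ _ _).1 hp with ⟨k, hk, rfl⟩
    have : kw ∉ xs[k] := fun hm => h (List.mem_flatMap.2 ⟨xs[k], List.getElem_mem hk, hm⟩)
    simp [this]

-- A's whole loop, in B's canonical form: distinct keywords mapped to their per-keyword scan sets.
lemma pv_main (xs : List (List String)) :
    (PySem.List.enumerate xs 0).foldl
      (fun d p =>
        p.2.foldl (fun d kw =>
          let d' := if d.contains kw then d else d.insert kw PySem.Set.empty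
          d'.modify kw PySem.Set.empty (fun s => PySem.Set.add s p.1)) d)
      PySem.Dict.empty
    = PySem.Dict.mk ((PySem.List.dedup (xs.flatMap (fun kws => kws))).map
        (fun kw => (kw, pvBset kw (PySem.List.enumerate xs 0)))) := by
  induction xs using List.reverseRecOn with
  | nil => rfl
  | append_singleton xs a ih =>
      rw [PySem.List.enumerate_append, List.foldl_append, ih]
      rw [PySem.List.enumerate_cons, PySem.List.enumerate_nil]
      simp only [List.foldl_cons, List.foldl_nil]
      rw [pv_inner _ _ _ _ (fun kw hkw => pv_bset_nil kw xs (by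
        simpa [PySem.List.mem_dedup] using hkw))]
      congr 1
      have hflat : (xs ++ [a]).flatMap (fun kws => kws) = xs.flatMap (fun kws => kws) ++ a := by
        simp
      rw [hflat]
      have hded : PySem.List.dedup (xs.flatMap (fun kws => kws) ++ a)
          = a.foldl PySem.Set.add (PySem.List.dedup (xs.flatMap (fun kws => kws))) := by
        rw [PySem.List.dedup_eq_ofList, PySem.List.dedup_eq_ofList,
            PySem.Set.ofList_eq_foldl, PySem.Set.ofList_eq_foldl, List.foldl_append]
      rw [hded]
      apply List.map_congr_left
      intro kw _
      have hb : pvBset kw (PySem.List.enumerate xs 0 ++ [((0 : Int) + ↑xs.length, a)])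
          = if a.contains kw then PySem.Set.add (pvBset kw (PySem.List.enumerate xs 0)) ((0:Int) + ↑xs.length)
            else pvBset kw (PySem.List.enumerate xs 0) := by
        unfold pvBset
        rw [List.foldl_append]
        rfl
      rw [hb]
      by_cases hm : kw ∈ a
      · simp [hm]
      · simp [hm]

-- ===== VERDICT (by name: the statement is the Claim_ definition above) =====
theorem create_keyword_to_articles_mapping_py_spec : Claim_equal_create_keyword_to_articles_mapping_py := by
  intro xs _
  unfold Spec_create_keyword_to_articles_mapping_py
  unfold create_keyword_to_articles_mapping_py
  rw [pv_main]
  rfl
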